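-- pv_equiv track=rewrite | github.com/jenny2e/capstone-design-2026-1 | backend/app/eta/positional_parser.py | _cluster_line_positions
-- ===== SOURCE A (Python) =====
-- from typing import List, Tuple
--
-- def _cluster_line_positions(positions: List[int], min_gap: int = 5) -> List[Tuple[int, int]]:
--     """연속된 픽셀 위치들을 클러스터(start, end)로 묶는다."""
--     if not positions:
--         return []
--     clusters: List[Tuple[int, int]] = []
--     start = positions[0]
--     prev  = positions[0]
--     for p in positions[1:]:
--         if p <= prev + min_gap:
--             prev = p
--         else:
--             clusters.append((start, prev))
--             start = p
--             prev  = p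
--     clusters.append((start, prev))
--     return clusters
-- ===== SOURCE B (Python) =====
-- from typing import List, Tuple
--
-- def _cluster_line_positions(positions: List[int], min_gap: int = 5) -> List[Tuple[int, int]]:
--     """Single backward pass: scan right-to-left, merging each position into the
--     cluster built so far or opening a new one; no separate start/prev state."""
--     clusters: List[Tuple[int, int]] = []
--     for p in reversed(positions):
--         if clusters and clusters[-1][0] <= p + min_gap:
--             clusters[-1] = (p, clusters[-1][1])
--         else:
--             clusters.append((p, p))
--     clusters.reverse()
--     return clusters
-- ===== Notes on version B (the rewrite author's own statement) =====
-- stated objective: alternative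
-- what changed: Replaced A's forward fold carrying (clusters, start, prev) state with a flush at loop exit by a single backward pass that merges each position into the head cluster of the result built so far (no separate start/prev state, no final flush).
import Mathlib
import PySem

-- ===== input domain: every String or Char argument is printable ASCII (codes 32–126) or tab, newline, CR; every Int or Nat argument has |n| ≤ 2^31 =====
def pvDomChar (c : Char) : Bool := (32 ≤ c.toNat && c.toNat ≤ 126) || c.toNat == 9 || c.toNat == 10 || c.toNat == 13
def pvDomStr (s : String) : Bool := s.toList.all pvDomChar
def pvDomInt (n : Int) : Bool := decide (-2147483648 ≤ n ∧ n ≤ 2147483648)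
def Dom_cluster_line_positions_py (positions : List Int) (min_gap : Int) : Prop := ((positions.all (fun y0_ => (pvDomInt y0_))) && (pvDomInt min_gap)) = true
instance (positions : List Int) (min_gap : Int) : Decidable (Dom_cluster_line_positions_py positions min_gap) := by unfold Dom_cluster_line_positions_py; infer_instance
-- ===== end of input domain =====

-- B replaces A's forward fold carrying (clusters, start, prev) by a single backward
-- pass that merges each position into the cluster built so far (objective: alternative
-- decomposition, same O(n) cost).

-- ===== PORT A =====
-- literal port of A: empty check, then a fold over positions[1:] with state
-- (clusters, start, prev), flushing the open cluster at the end
def cluster_line_positions_py (positions : List Int) (min_gap : Int) : List (Int × Int) :=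
  match positions with
  | [] => []
  | p0 :: _ =>
    let st := (PySem.List.slice positions (some 1) none).foldl
      (fun (st : List (Int × Int) × Int × Int) p =>
        if p ≤ st.2.2 + min_gap then (st.1, st.2.1, p)
        else (st.1 ++ [(st.2.1, st.2.2)], p, p)) ([], p0, p0)
    st.1 ++ [(st.2.1, st.2.2)]

-- ===== PORT B =====
-- literal port of Source B: iterate over reversed(positions); Lean's list head plays the
-- role of Python's clusters[-1] (Python appends at the back and reverses at the end,
-- which is exactly cons at the front here, so no final reverse is needed)
def cluster_line_positions_py_alt (positions : List Int) (min_gap : Int) : List (Int × Int) :=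
  positions.reverse.foldl
    (fun acc p =>
      match acc with
      | (s, e) :: rest => if s ≤ p + min_gap then (p, e) :: rest else (p, p) :: (s, e) :: rest
      | [] => [(p, p)]) []

-- ===== PRECONDITION & SPEC =====
def Spec_cluster_line_positions_py (positions : List Int) (min_gap : Int) (out : List (Int × Int)) : Prop := out = cluster_line_positions_py_alt positions min_gap
instance (positions : List Int) (min_gap : Int) (out : List (Int × Int)) : Decidable (Spec_cluster_line_positions_py positions min_gap out) := by unfold Spec_cluster_line_positions_py; infer_instance

-- ===== CLAIM (what is proved, stated in full; the proofs are below) =====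
def Claim_equal_cluster_line_positions_py : Prop := ∀ (positions : List Int) (min_gap : Int), Dom_cluster_line_positions_py positions min_gap → Spec_cluster_line_positions_py positions min_gap (cluster_line_positions_py positions min_gap)

-- ===== LEMMAS AND PROOFS =====

-- A's loop, written as structural recursion without the accumulator
def loopA (g s pr : Int) : List Int → List (Int × Int)
  | [] => [(s, pr)]
  | p :: ps => if p ≤ pr + g then loopA g s p ps else (s, pr) :: loopA g p p ps

-- B's step function
def stepB (g p : Int) (acc : List (Int × Int)) : List (Int × Int) :=
  match acc with
  | (s, e) :: rest => if s ≤ p + g then (p, e) :: rest else (p, p) :: (s, e) :: rest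
  | [] => [(p, p)]

-- A's fold with accumulator equals cs ++ loopA
theorem foldA_eq_loopA (g : Int) (l : List Int) : ∀ (cs : List (Int × Int)) (s pr : Int),
    (let st := l.foldl
      (fun (st : List (Int × Int) × Int × Int) p =>
        if p ≤ st.2.2 + g then (st.1, st.2.1, p)
        else (st.1 ++ [(st.2.1, st.2.2)], p, p)) (cs, s, pr)
     st.1 ++ [(st.2.1, st.2.2)]) = cs ++ loopA g s pr l := by
  induction l with
  | nil => intro cs s pr; simp [loopA]
  | cons p ps ih =>
    intro cs s pr
    by_cases h : p ≤ pr + g <;> simp [loopA, h, ih, List.append_assoc]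

-- the start parameter of loopA only shows up in the first component of the head
theorem loopA_start_shape (g : Int) (qs : List Int) : ∀ (pr : Int),
    ∃ e rest, ∀ s, loopA g s pr qs = (s, e) :: rest := by
  induction qs with
  | nil => intro pr; exact ⟨pr, [], fun s => rfl⟩
  | cons r rs ih =>
    intro pr
    by_cases h : r ≤ pr + g
    · obtain ⟨e, rest, he⟩ := ih r
      exact ⟨e, rest, fun s => by simp [loopA, h, he]⟩
    · exact ⟨pr, loopA g r r rs, fun s => by simp [loopA, h]⟩

-- A's loop equals B's right fold
theorem loopA_eq_foldr (g : Int) (ps : List Int) : ∀ (p : Int),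
    loopA g p p ps = stepB g p (ps.foldr (stepB g) []) := by
  induction ps with
  | nil => intro p; rfl
  | cons q qs ih =>
    intro p
    obtain ⟨e, rest, he⟩ := loopA_start_shape g qs q
    rw [List.foldr_cons, ← ih q, he q]
    by_cases h : q ≤ p + g
    · simp [loopA, h, he p, stepB]
    · simp [loopA, h, he q, stepB]

-- ===== VERDICT (by name: the statement is the Claim_ definition above) =====
theorem cluster_line_positions_py_spec : Claim_equal_cluster_line_positions_py := by
  intro positions min_gap _
  unfold Spec_cluster_line_positions_py cluster_line_positions_py cluster_line_positions_py_alt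
  rw [List.foldl_reverse]
  cases positions with
  | nil => rfl
  | cons p0 ps =>
    simp only [PySem.List.slice_from_one, List.tail_cons, List.foldr_cons]
    have h1 := foldA_eq_loopA min_gap ps [] p0 p0
    simp only [List.nil_append] at h1
    rw [h1, loopA_eq_foldr]
    rfl
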